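-- pv_equiv track=rewrite | github.com/fflorey/advent_of_code_2023 | 7/7b.py | find_two_pair
-- ===== SOURCE A (Python) =====
-- def count_number_of_jokers_in_cards(cards):
--     count = 0
--     for card in cards:
--         if 'J' in card:
--             count += 1
--     return count
--
-- def find_two_pair(cards):
--     result = []
--     for card in cards:
--         orig=card
--         counts = {}
--         jokers=count_number_of_jokers_in_cards(card)
--         card = card.replace('J', '')
--         for char in card:
--             counts[char] = counts.get(char, 0) + 1
--         if len(counts) == 3 and list(counts.values()).count(2) == 2:
--             result.append(orig)
--         elif len(set(card)) == 3 and jokers == 1: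
--             result.append(orig)
--     return result
-- ===== SOURCE B (Python) =====
-- def _run_lengths(chars):
--     # chars is sorted; return the lengths of its maximal runs of equal chars
--     if not chars:
--         return []
--     i = 1
--     while i < len(chars) and chars[i] == chars[0]:
--         i += 1
--     return [i] + _run_lengths(chars[i:])
--
--
-- def find_two_pair(cards):
--     result = []
--     for card in cards:
--         rest = sorted(c for c in card if c != 'J')
--         runs = _run_lengths(rest)
--         if len(runs) == 3 and (runs.count(2) == 2 or len(card) - len(rest) == 1):
--             result.append(card)
--     return result
-- ===== Notes on version B (the rewrite author's own statement) =====
-- stated objective: alternative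
-- what changed: B replaces A's dict-of-counts accumulation and two separate branch predicates by a sort-then-group signature: it sorts the non-joker characters, recursively extracts the run lengths of the sorted list, and accepts when there are exactly 3 runs and either two runs of length 2 or exactly one joker (jokers obtained as a length difference).
import Mathlib
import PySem

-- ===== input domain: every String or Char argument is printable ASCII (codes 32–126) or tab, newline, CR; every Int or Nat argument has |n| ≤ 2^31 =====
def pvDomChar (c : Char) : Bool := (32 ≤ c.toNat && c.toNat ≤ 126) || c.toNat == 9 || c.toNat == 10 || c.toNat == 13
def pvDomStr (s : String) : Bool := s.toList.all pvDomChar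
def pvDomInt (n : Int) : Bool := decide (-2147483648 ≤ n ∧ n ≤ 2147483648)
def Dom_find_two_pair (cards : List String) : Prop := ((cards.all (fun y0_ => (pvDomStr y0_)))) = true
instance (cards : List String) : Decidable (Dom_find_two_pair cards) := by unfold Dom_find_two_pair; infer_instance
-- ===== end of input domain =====

-- B replaces A's dict-of-counts accumulation and two branch predicates by a sort-then-group
-- run-length signature over the non-joker characters; objective: alternative, same return value.

-- ===== PORT A =====
-- iterating a Python str yields 1-char strings, so `'J' in card` (card a 1-char string) is Chars.isIn ['J'] [card]
def count_number_of_jokers_in_cards (cards : String) : Int :=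
  cards.toList.foldl (fun count card => if PySem.Chars.isIn ['J'] [card] then count + 1 else count) 0

def find_two_pair (cards : List String) : List String :=
  cards.foldl (fun result card =>
    let orig := card
    let jokers := count_number_of_jokers_in_cards card
    let card' := PySem.Str.replace card "J" ""
    let counts : PySem.Dict Char Int :=
      card'.toList.foldl (fun counts char => counts.insert char (counts.getD char 0 + 1)) PySem.Dict.empty
    if counts.size = 3 ∧ counts.values.count 2 = 2 then result ++ [orig]
    else if (PySem.Set.ofList card'.toList).length = 3 ∧ jokers = 1 then result ++ [orig]
    else result) []

-- ===== PORT B =====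
-- the inner while loop counts the leading run of chars[0]; ported as takeWhile/dropWhile of the
-- equality predicate, which computes exactly the same prefix length and the same suffix chars[i:]
def run_lengths : List Char → List Int
  | [] => []
  | c :: t =>
    ((1 : Int) + (t.takeWhile (fun x => x == c)).length) :: run_lengths (t.dropWhile (fun x => x == c))
  termination_by l => l.length
  decreasing_by
    exact Nat.lt_succ_of_le (List.length_dropWhile_le _ _)

def find_two_pair_alt (cards : List String) : List String :=
  cards.foldl (fun result card =>
    let rest := PySem.List.sorted (card.toList.filter (fun c => c ≠ 'J')) (fun x => x) false
    let runs := run_lengths rest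
    if runs.length = 3 ∧ (runs.count 2 = 2 ∨ (card.toList.length : Int) - rest.length = 1)
    then result ++ [card] else result) []

-- ===== PRECONDITION & SPEC =====
def Spec_find_two_pair (cards : List String) (out : List String) : Prop := out = find_two_pair_alt cards
instance (cards : List String) (out : List String) : Decidable (Spec_find_two_pair cards out) := by unfold Spec_find_two_pair; infer_instance

-- ===== CLAIM (what is proved, stated in full; the proofs are below) =====
def Claim_equal_find_two_pair : Prop := ∀ (cards : List String), Dom_find_two_pair cards → Spec_find_two_pair cards (find_two_pair cards)

-- ===== LEMMAS AND PROOFS =====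
lemma replace_go_J (fuel : Nat) : ∀ (l acc : List Char), l.length ≤ fuel →
    PySem.Chars.replace.go ['J'] [] fuel l acc = acc.reverse ++ l.filter (fun c => c ≠ 'J') := by
  induction fuel with
  | zero => intro l acc h; rw [PySem.Chars.replace.go.eq_def]; simp_all
  | succ n ih =>
    intro l acc h
    cases l with
    | nil => rw [PySem.Chars.replace.go.eq_def]; simp
    | cons c t =>
      rw [PySem.Chars.replace.go.eq_def]
      by_cases hc : c = 'J'
      · subst hc
        simp only [List.isPrefixOf]
        simp [ih t acc (by simpa using h)]
      · have hp : List.isPrefixOf ['J'] (c :: t) = false := by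
          simp [List.isPrefixOf, Ne.symm hc]
        simp only [hp, Bool.false_eq_true, if_false]
        rw [ih t (c :: acc) (by simpa using h)]
        simp [hc]

lemma replace_J_toList (s : String) :
    (PySem.Str.replace s "J" "").toList = s.toList.filter (fun c => c ≠ 'J') := by
  rw [PySem.Str.toList_replace, PySem.Chars.replace]
  simpa using replace_go_J s.toList.length s.toList [] le_rfl

lemma isIn_J_singleton (c : Char) : PySem.Chars.isIn ['J'] [c] = (c == 'J') := by
  by_cases h : c = 'J'
  · subst h; simp [PySem.Chars.isIn_iff_infix]
  · have hb : (c == 'J') = false := by simp [h]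
    rw [hb, PySem.Chars.isIn_eq_false_iff]
    intro hinf
    exact h (List.mem_singleton.mp (hinf.mem (by simp))).symm

lemma jokers_eq (s : String) :
    count_number_of_jokers_in_cards s = (s.toList.count 'J' : Int) := by
  unfold count_number_of_jokers_in_cards
  simp only [isIn_J_singleton]
  simpa using PySem.List.foldl_beq_add_one s.toList 'J' 0

lemma count_J_length (s : List Char) :
    s.count 'J' + (s.filter (fun c => c ≠ 'J')).length = s.length := by
  have h1 : (s.filter (fun c => c ≠ 'J')).length = s.countP (fun c => c ≠ 'J') :=
    List.countP_eq_length_filter.symm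
  have h2 := List.length_eq_countP_add_countP (fun c : Char => decide (c ≠ 'J')) (l := s)
  have h3 : s.count 'J' = s.countP (fun a => decide ¬(decide (a ≠ 'J') = true)) := by
    rw [List.count_eq_countP]
    apply List.countP_congr
    intro c _
    by_cases h : c = 'J' <;> simp [h]
  omega

lemma counter_size (rest : List Char) :
    (PySem.Dict.counter rest (κ := Char)).size = (PySem.Set.ofList rest).length := by
  show (PySem.Dict.counter rest).items.length = _
  rw [PySem.Dict.items_counter]
  exact List.length_map ..

lemma counter_values_count (rest : List Char) :
    (PySem.Dict.counter rest (κ := Char)).values.count 2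
      = (PySem.Set.ofList rest).countP (fun k => rest.count k == 2) := by
  show ((PySem.Dict.counter rest).items.map (·.2)).count 2 = _
  rw [PySem.Dict.items_counter, List.map_map, List.count_eq_countP, List.countP_map]
  apply List.countP_congr
  intro k _
  by_cases h : rest.count k = 2
  · simp [h]
  · simp [h]
    omega

lemma discard_not_mem {s : List Char} {c : Char} (h : c ∉ s) : PySem.Set.discard s c = s := by
  simp only [PySem.Set.discard]
  apply List.filter_eq_self.mpr
  intro x hx
  simp only [Bool.not_eq_eq_eq_not, Bool.not_true, beq_eq_false_iff_ne, ne_eq]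
  exact fun heq => h (heq ▸ hx)

lemma discard_cons_self (s : List Char) (c : Char) :
    PySem.Set.discard (c :: s) c = PySem.Set.discard s c := by
  simp [PySem.Set.discard]

-- set of a list whose head's run has been split off
lemma ofList_of_run (c : Char) (t₁ t₂ : List Char) (h1 : ∀ x ∈ t₁, x = c) (h2 : c ∉ t₂) :
    PySem.Set.ofList (c :: (t₁ ++ t₂)) = c :: PySem.Set.ofList t₂ := by
  have hnm : c ∉ PySem.Set.ofList t₂ := fun hm => h2 ((PySem.Set.mem_ofList _ _).mp hm)
  induction t₁ with
  | nil =>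
    rw [List.nil_append, PySem.Set.ofList_cons]
    congr 1
    exact discard_not_mem hnm
  | cons d t₁ ih =>
    have hd : d = c := h1 d (by simp)
    subst hd
    have ih' := ih (fun x hx => h1 x (by simp [hx]))
    rw [List.cons_append, PySem.Set.ofList_cons, ih', discard_cons_self, discard_not_mem hnm]

-- on a ≤-sorted list, the run lengths are exactly the multiplicities of the distinct elements
lemma run_lengths_sorted : ∀ (s : List Char), s.Pairwise (· ≤ ·) →
    run_lengths s = (PySem.Set.ofList s).map (fun k => (s.count k : Int)) := by
  intro s
  induction hn : s.length using Nat.strong_induction_on generalizing s with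
  | _ n ih =>
  cases s with
  | nil => intro _; simp [run_lengths]
  | cons c t =>
    intro hsort
    set t₁ := t.takeWhile (fun x => x == c) with ht₁
    set t₂ := t.dropWhile (fun x => x == c) with ht₂
    have hsplit : t = t₁ ++ t₂ := (List.takeWhile_append_dropWhile).symm
    have ht₁c : ∀ x ∈ t₁, x = c := by
      intro x hx
      have := List.mem_takeWhile_imp hx
      simpa using this
    have hge : ∀ x ∈ t, c ≤ x := by
      intro x hx
      exact (List.pairwise_cons.mp hsort).1 x hx
    have ht₂sort : t₂.Pairwise (· ≤ ·) :=
      (((List.pairwise_cons.mp hsort).2).sublist (List.dropWhile_sublist _))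
    have hct₂ : c ∉ t₂ := by
      intro hmem
      cases h2 : t₂ with
      | nil => simp [h2] at hmem
      | cons y r =>
        have hy : ¬ (y == c) = true := by
          have := List.head?_dropWhile_not (fun x => x == c) t
          rw [← ht₂, h2] at this
          simpa using this
        have hyc : c < y := by
          have hyt : y ∈ t := by
            have : y ∈ t₂ := by simp [h2]
            rw [hsplit]; exact List.mem_append_right _ this
          rcases lt_or_eq_of_le (hge y hyt) with h | h
          · exact h
          · exact absurd (by simp [h]) hy
        rw [h2] at hmem
        rcases List.mem_cons.mp hmem with h | h
        · exact absurd (by simp [h]) hy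
        · have : y ≤ c := by
            have := (List.pairwise_cons.mp (h2 ▸ ht₂sort)).1 c h
            exact this
          exact absurd hyc (not_lt.mpr this)
    have hcount : ((c :: t).count c : Int) = 1 + t₁.length := by
      have hc1 : t₁.count c = t₁.length := by
        rw [List.count_eq_length.mpr]
        intro x hx; simp [ht₁c x hx]
      have hc2 : t₂.count c = 0 := List.count_eq_zero.mpr hct₂
      rw [List.count_cons_self, hsplit, List.count_append, hc1, hc2]
      push_cast; ring
    have hset : PySem.Set.ofList (c :: t) = c :: PySem.Set.ofList t₂ := by
      rw [hsplit]; exact ofList_of_run c t₁ t₂ ht₁c hct₂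
    have hlen : t₂.length < n := by
      have h5 : t₂.length ≤ t.length := by
        rw [ht₂]; exact List.length_dropWhile_le _ _
      simp only [List.length_cons] at hn
      omega
    have iht₂ := ih t₂.length hlen t₂ rfl ht₂sort
    rw [run_lengths, hset, List.map_cons, ← ht₁, ← ht₂, iht₂, ← hcount]
    congr 1
    apply List.map_congr_left
    intro k hk
    have hkt₂ : k ∈ t₂ := (PySem.Set.mem_ofList _ _).mp hk
    have hkc : k ≠ c := fun h => hct₂ (h ▸ hkt₂)
    have : (c :: t).count k = t₂.count k := by
      rw [List.count_cons_of_ne (Ne.symm hkc), hsplit, List.count_append,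
        List.count_eq_zero.mpr (fun hm => hkc (ht₁c k hm)), Nat.zero_add]
    rw [this]

-- the per-card step of A equals the per-card step of B
set_option maxHeartbeats 1000000 in
lemma per_card (result : List String) (card : String) :
    (let orig := card
     let jokers := count_number_of_jokers_in_cards card
     let card' := PySem.Str.replace card "J" ""
     let counts : PySem.Dict Char Int :=
       card'.toList.foldl (fun counts char => counts.insert char (counts.getD char 0 + 1)) PySem.Dict.empty
     if counts.size = 3 ∧ counts.values.count 2 = 2 then result ++ [orig]
     else if (PySem.Set.ofList card'.toList).length = 3 ∧ jokers = 1 then result ++ [orig]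
     else result)
    = (let rest := PySem.List.sorted (card.toList.filter (fun c => c ≠ 'J')) (fun x => x) false
       let runs := run_lengths rest
       if runs.length = 3 ∧ (runs.count 2 = 2 ∨ (card.toList.length : Int) - rest.length = 1)
       then result ++ [card] else result) := by
  dsimp only
  rw [replace_J_toList, jokers_eq,
    PySem.Dict.foldl_insert_getD_add_one_eq_counter, counter_size, counter_values_count]
  set r := card.toList.filter (fun c => c ≠ 'J') with hr
  set r' := PySem.List.sorted r (fun x => x) false with hr'
  have hperm : r'.Perm r := PySem.List.sorted_perm ..
  have hsetperm : (PySem.Set.ofList r').Perm (PySem.Set.ofList r) := by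
    rw [List.perm_ext_iff_of_nodup (PySem.Set.nodup_ofList _) (PySem.Set.nodup_ofList _)]
    intro a
    rw [PySem.Set.mem_ofList, PySem.Set.mem_ofList]
    exact ⟨fun h => hperm.mem_iff.mp h, fun h => hperm.mem_iff.mpr h⟩
  have hruns : run_lengths r' = (PySem.Set.ofList r').map (fun k => (r'.count k : Int)) :=
    run_lengths_sorted r' (PySem.List.sorted_pairwise ..)
  have hlen : (run_lengths r').length = (PySem.Set.ofList r).length := by
    rw [hruns, List.length_map]; exact hsetperm.length_eq
  have hcnt : (run_lengths r').count 2 = (PySem.Set.ofList r).countP (fun k => r.count k == 2) := by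
    rw [hruns, List.count_eq_countP, List.countP_map]
    have : ∀ k, ((fun k => ((r'.count k : Int)) == 2) ∘ (fun k => k)) k
        = (fun k => r.count k == 2) k := by
      intro k
      simp only [Function.comp_apply]
      rw [hperm.count_eq]
      by_cases h : r.count k = 2
      · simp [h]
      · simp [h]; omega
    calc (PySem.Set.ofList r').countP _
        = (PySem.Set.ofList r').countP (fun k => r.count k == 2) := by
          apply List.countP_congr
          intro k _
          have hk := this k
          simp only [Function.comp_apply] at hk
          rw [← hk]
          rfl
      _ = (PySem.Set.ofList r).countP (fun k => r.count k == 2) := hsetperm.countP_eq _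
  have hjok : (card.toList.length : Int) - r'.length = (card.toList.count 'J' : Int) := by
    have h1 : r'.length = r.length := hperm.length_eq
    have h2 : card.toList.count 'J' + r.length = card.toList.length := by
      rw [hr]; exact count_J_length card.toList
    rw [h1]; omega
  rw [hlen, hcnt, hjok]
  set n := (PySem.Set.ofList r).length
  set p := (PySem.Set.ofList r).countP (fun k => r.count k == 2)
  set j := (card.toList.count 'J' : Int)
  by_cases h3 : n = 3
  · by_cases hP : p = 2
    · simp [h3, hP]
    · by_cases hJ : j = 1
      · simp [h3, hP, hJ]
      · simp [h3, hP, hJ]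
  · simp [h3]

-- ===== VERDICT (by name: the statement is the Claim_ definition above) =====
theorem find_two_pair_spec : Claim_equal_find_two_pair := by
  intro cards _
  show find_two_pair cards = find_two_pair_alt cards
  unfold find_two_pair find_two_pair_alt
  exact congrArg (fun f => List.foldl f ([] : List String) cards)
    (funext fun r => funext fun c => per_card r c)
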